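-- pv_equiv track=rewrite | github.com/pabenito/QRest | app/core/use_cases/services/command.py | _remove_sublist_with_repetition
-- ===== SOURCE A (Python) =====
-- from collections import Counter
--
-- def _remove_sublist_with_repetition(original_list: list, sublist: list):
--     sublist_frequencies = Counter(sublist)
--     result_list = []
--     for item in original_list:
--         if sublist_frequencies[item] > 0:
--             sublist_frequencies[item] -= 1
--         else:
--             result_list.append(item)
--     return result_list
-- ===== SOURCE B (Python) =====
-- def _remove_sublist_with_repetition(original_list: list, sublist: list):
--     result = list(original_list)
--     for item in sublist:
--         if item in result:
--             result.remove(item)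
--     return result
-- ===== Notes on version B (the rewrite author's own statement) =====
-- stated objective: simpler
-- what changed: B drives the loop over the sublist, deleting the first occurrence of each item from a copy of the original with list.remove, instead of building a Counter and filtering the original in one pass.
import Mathlib
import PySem

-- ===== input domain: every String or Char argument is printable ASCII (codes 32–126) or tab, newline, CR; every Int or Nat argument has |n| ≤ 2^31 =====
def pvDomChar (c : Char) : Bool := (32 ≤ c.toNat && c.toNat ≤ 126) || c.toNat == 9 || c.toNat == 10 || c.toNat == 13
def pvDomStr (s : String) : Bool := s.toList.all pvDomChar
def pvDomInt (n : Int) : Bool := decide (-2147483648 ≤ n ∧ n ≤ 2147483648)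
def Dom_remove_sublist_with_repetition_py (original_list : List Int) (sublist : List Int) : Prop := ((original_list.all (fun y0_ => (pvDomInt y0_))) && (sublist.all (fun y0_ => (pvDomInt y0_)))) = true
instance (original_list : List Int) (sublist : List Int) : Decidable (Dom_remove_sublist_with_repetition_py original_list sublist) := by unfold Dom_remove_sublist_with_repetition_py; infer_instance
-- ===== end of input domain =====

-- B copies the original list and deletes the first occurrence of each sublist item
-- with remove, instead of A's Counter built over the sublist and one filtering pass.

-- ===== PORT A =====
-- Counter(sublist); then one pass over original_list decrementing or appending.
def remove_sublist_with_repetition_py (original_list : List Int) (sublist : List Int) : List Int :=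
  let sublist_frequencies := PySem.Dict.counter sublist
  (original_list.foldl
    (fun (st : PySem.Dict Int Int × List Int) item =>
      if st.1.getD item 0 > 0 then
        (st.1.insert item (st.1.getD item 0 - 1), st.2)
      else
        (st.1, st.2 ++ [item]))
    (sublist_frequencies, [])).2

-- ===== PORT B =====
-- for item in sublist: if item in result: result.remove(item)
def remove_sublist_with_repetition_py_alt (original_list : List Int) (sublist : List Int) : List Int :=
  sublist.foldl
    (fun result item =>
      if item ∈ result then
        match PySem.List.remove? result item with
        | some r => r
        | none => result
      else result)
    original_list

-- ===== PRECONDITION & SPEC =====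
def Spec_remove_sublist_with_repetition_py (original_list : List Int) (sublist : List Int) (out : List Int) : Prop := out = remove_sublist_with_repetition_py_alt original_list sublist
instance (original_list : List Int) (sublist : List Int) (out : List Int) : Decidable (Spec_remove_sublist_with_repetition_py original_list sublist out) := by unfold Spec_remove_sublist_with_repetition_py; infer_instance

-- ===== CLAIM (what is proved, stated in full; the proofs are below) =====
def Claim_equal_remove_sublist_with_repetition_py : Prop := ∀ (original_list : List Int) (sublist : List Int), Dom_remove_sublist_with_repetition_py original_list sublist → Spec_remove_sublist_with_repetition_py original_list sublist (remove_sublist_with_repetition_py original_list sublist)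

-- ===== LEMMAS AND PROOFS =====

-- A's loop with the counter state abstracted to a bare counting function.
def pvLoopA (f : Int → Int) : List Int → List Int
  | [] => []
  | a :: rest =>
    if 0 < f a then pvLoopA (fun v => if v = a then f v - 1 else f v) rest
    else a :: pvLoopA f rest

-- A's dict-state fold computes pvLoopA of the getD view of the dict.
lemma foldA_eq_loopA (orig : List Int) :
    ∀ (d : PySem.Dict Int Int) (res : List Int),
      (orig.foldl
        (fun (st : PySem.Dict Int Int × List Int) item =>
          if st.1.getD item 0 > 0 then
            (st.1.insert item (st.1.getD item 0 - 1), st.2)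
          else
            (st.1, st.2 ++ [item]))
        (d, res)).2 = res ++ pvLoopA (fun v => d.getD v 0) orig := by
  induction orig with
  | nil => intro d res; simp [pvLoopA]
  | cons a rest ih =>
    intro d res
    by_cases h : 0 < d.getD a 0
    · simp only [List.foldl_cons, pvLoopA, h, if_pos, gt_iff_lt]
      rw [ih]
      congr 1
      congr 1
      funext v
      rw [PySem.Dict.getD_insert]
      by_cases hv : v = a <;> simp [hv]
    · simp only [List.foldl_cons, pvLoopA, h, gt_iff_lt, if_false]
      rw [ih]
      simp

-- one step of B's fold is List.erase
lemma stepB_eq_erase (res : List Int) (item : Int) :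
    (if item ∈ res then
      match PySem.List.remove? res item with
      | some r => r
      | none => res
     else res) = res.erase item := by
  by_cases h : item ∈ res
  · simp [h, PySem.List.remove?_eq_some_erase res item h]
  · simp [h, List.erase_of_not_mem h]

-- the key transfer lemma: one extra unit of budget at x = erasing the first x
lemma loopA_bump (x : Int) (orig : List Int) :
    ∀ (f : Int → Int), 0 ≤ f x →
      pvLoopA (fun v => f v + (if v = x then 1 else 0)) orig = pvLoopA f (orig.erase x) := by
  induction orig with
  | nil => intro f _; simp [pvLoopA]
  | cons a rest ih =>
    intro f hfx
    by_cases hax : a = x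
    · subst hax
      rw [List.erase_cons_head]
      simp only [pvLoopA]
      split_ifs with h1 h2 h3
      all_goals try (exact absurd trivial (by assumption))
      all_goals try (exfalso; omega)
      have hfun : (fun v => if v = a then f v + 1 - 1 else f v + 0) = f := by
        funext v; by_cases hv : v = a <;> simp [hv]
      rw [hfun]
    · have herase : (a :: rest).erase x = a :: rest.erase x :=
        List.erase_cons_tail (by simp [hax])
      rw [herase]
      have hxa : ¬ x = a := Ne.symm hax
      have hfun : (fun v => if v = a then (f v + (if v = x then (1:Int) else 0)) - 1
                       else f v + (if v = x then 1 else 0))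
           = (fun v => (if v = a then f v - 1 else f v) + (if v = x then 1 else 0)) := by
        funext v
        by_cases hv : v = a
        · subst hv; simp [hax]
        · simp [hv]
      simp only [pvLoopA]
      split_ifs with hc hd hd
      · rw [hfun, ih _ (by simp [hxa]; omega)]
      · exfalso; simp at hc; omega
      · exfalso; simp at hc; omega
      · rw [ih f hfx]

lemma loopA_zero (orig : List Int) : pvLoopA (fun _ => (0 : Int)) orig = orig := by
  induction orig with
  | nil => rfl
  | cons a rest ih => simp [pvLoopA, ih]

lemma loopA_count_eq_alt (sub : List Int) :
    ∀ (orig : List Int),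
      pvLoopA (fun v => (sub.count v : Int)) orig = remove_sublist_with_repetition_py_alt orig sub := by
  induction sub with
  | nil =>
    intro orig
    simp only [remove_sublist_with_repetition_py_alt, List.foldl_nil]
    simpa using loopA_zero orig
  | cons x s ih =>
    intro orig
    have hfun : (fun v => (((x :: s).count v : Nat) : Int))
        = (fun v => ((s.count v : Nat) : Int) + (if v = x then 1 else 0)) := by
      funext v
      by_cases hv : v = x
      · simp [hv]
      · simp [hv, Ne.symm hv]
    rw [hfun, loopA_bump x orig _ (by positivity), ih]
    simp only [remove_sublist_with_repetition_py_alt, List.foldl_cons]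
    rw [stepB_eq_erase]

-- ===== VERDICT (by name: the statement is the Claim_ definition above) =====
theorem remove_sublist_with_repetition_py_spec : Claim_equal_remove_sublist_with_repetition_py := by
  intro orig sub _
  show remove_sublist_with_repetition_py orig sub = remove_sublist_with_repetition_py_alt orig sub
  unfold remove_sublist_with_repetition_py
  rw [foldA_eq_loopA]
  have : (fun v => (PySem.Dict.counter sub).getD v 0) = (fun v => (sub.count v : Int)) := by
    funext v; exact PySem.Dict.getD_counter sub v
  simp only [List.nil_append, this]
  exact loopA_count_eq_alt sub orig
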